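-- pv_equiv track=rewrite | github.com/Kowal546/RecruitmentDigitalFingerprints | main.py | find_identical_snowflakes
-- ===== SOURCE A (Python) =====
-- def hash_snowflake(snowflake):
--     min_index = min(range(len(snowflake)), key=lambda i: snowflake[i:] + snowflake[:i])
--     normalized_snowflake = snowflake[min_index:] + snowflake[:min_index]
--     return tuple(normalized_snowflake)
--
-- def find_identical_snowflakes(input_vectors):
--     snowflake_dict = {}
--
--     for i, snowflake in enumerate(input_vectors):
--         normalized_snowflake = hash_snowflake(snowflake)
--         normalized_snowflake_reverse = hash_snowflake(snowflake[::-1])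
--         if normalized_snowflake in snowflake_dict:
--             snowflake_dict[normalized_snowflake].append(i)
--         elif normalized_snowflake_reverse in snowflake_dict:
--             snowflake_dict[normalized_snowflake_reverse].append(i)
--         else:
--             snowflake_dict[normalized_snowflake] = [i]
--
--     result_dict = {str(snowflake): indices for snowflake, indices in snowflake_dict.items() if len(indices) > 1}
--     return result_dict
-- ===== SOURCE B (Python) =====
-- def _canon(v):
--     # least rotation: only rotations starting at a minimal element can be minimal
--     m = min(v)
--     best = None
--     for i in range(len(v)):
--         if v[i] == m:
--             rot = v[i:] + v[:i]
--             if best is None or rot < best: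
--                 best = rot
--     return tuple(best)
--
-- def find_identical_snowflakes(input_vectors):
--     canons = [_canon(v) for v in input_vectors]
--     keys = [min(c, _canon(v[::-1])) for c, v in zip(canons, input_vectors)]
--     result = {}
--     for k in dict.fromkeys(keys):
--         idxs = [i for i, k2 in enumerate(keys) if k2 == k]
--         if len(idxs) > 1:
--             result[str(canons[idxs[0]])] = idxs
--     return result
-- ===== Notes on version B (the rewrite author's own statement) =====
-- stated objective: alternative
-- what changed: B canonicalizes by comparing only the rotations that start at a minimal element (instead of A's argmin over all rotation start indices) and replaces A's incremental dict with forward/reverse double probing by staged passes: precompute per-vector symmetric keys, then for each distinct key (first-occurrence order) collect its index list by a comprehension scan.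
import Mathlib
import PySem

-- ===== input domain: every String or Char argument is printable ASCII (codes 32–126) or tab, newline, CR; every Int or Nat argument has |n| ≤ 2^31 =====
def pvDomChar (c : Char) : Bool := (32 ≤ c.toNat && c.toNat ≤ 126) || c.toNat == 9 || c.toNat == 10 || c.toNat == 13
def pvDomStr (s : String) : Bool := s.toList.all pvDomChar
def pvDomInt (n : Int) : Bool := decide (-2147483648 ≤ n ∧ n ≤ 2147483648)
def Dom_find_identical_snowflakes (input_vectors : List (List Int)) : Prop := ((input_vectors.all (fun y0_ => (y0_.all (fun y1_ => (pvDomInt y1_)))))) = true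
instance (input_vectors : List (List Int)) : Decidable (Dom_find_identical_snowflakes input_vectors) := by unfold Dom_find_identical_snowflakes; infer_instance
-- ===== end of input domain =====

-- B canonicalizes by comparing only rotations that start at a minimal element (A takes an
-- argmin over all rotation start indices) and groups by staged passes — precomputed symmetric
-- keys, then one comprehension scan per distinct key — instead of A's incremental dict with
-- forward/reverse double probing (objective: alternative). Equivalence of the RETURN value is
-- proved on inputs whose vectors are all nonempty (on an empty vector both raise ValueError).

-- str(tuple_of_ints) — shared formatting primitive for both ports
def pyStrTuple (v : List Int) : String :=
  "(" ++ PySem.Str.join ", " (v.map PySem.Int.toStr) ++ (if v.length == 1 then ",)" else ")")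

-- ===== PORT A =====
-- min(range(len(s)), key=lambda i: s[i:] + s[:i]); none = ValueError on the empty list
def hash_snowflake (snowflake : List Int) : Option (List Int) :=
  match PySem.List.min? (PySem.List.pyRange 0 (snowflake.length : Int) 1)
      (fun i => PySem.List.slice snowflake (some i) none ++ PySem.List.slice snowflake none (some i)) with
  | none => none
  | some m => some (PySem.List.slice snowflake (some m) none ++ PySem.List.slice snowflake none (some m))

-- loop body of A; snowflake[::-1] is List.reverse (PySem.List.slice?_none_none_neg_one)
def stepA (d : PySem.Dict (List Int) (List Int)) (p : Int × List Int) : PySem.Dict (List Int) (List Int) :=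
  match hash_snowflake p.2, hash_snowflake p.2.reverse with
  | some n, some r =>
    if d.contains n then d.insert n (d.getD n [] ++ [p.1])
    else if d.contains r then d.insert r (d.getD r [] ++ [p.1])
    else d.insert n [p.1]
  | _, _ => d   -- unreachable under Pre_ (hash_snowflake is some on nonempty lists)

def find_identical_snowflakes (input_vectors : List (List Int)) : List (String × List Int) :=
  let snowflake_dict := (PySem.List.enumerate input_vectors 0).foldl stepA PySem.Dict.empty
  ((snowflake_dict.items.filter (fun kv => kv.2.length > 1)).foldl
      (fun rd kv => rd.insert (pyStrTuple kv.1) kv.2) PySem.Dict.empty).items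

-- ===== PORT B =====
-- Source B _canon: min(v), then a running minimum over only the rotations starting where v[i] == min(v)
def canonB (v : List Int) : List Int :=
  match PySem.List.min? v (fun x => x) with
  | none => []   -- min([]) raises ValueError in Python; unreachable under Pre_
  | some m =>
    ((PySem.List.pyRange 0 (v.length : Int) 1).foldl
        (fun best i =>
          if PySem.List.pyGetD v i 0 == m then
            let rot := PySem.List.slice v (some i) none ++ PySem.List.slice v none (some i)
            match best with
            | none => some rot
            | some b => if rot < b then some rot else some b
          else best) none).getD []   -- best is never None here: v contains its minimum

def find_identical_snowflakes_alt (input_vectors : List (List Int)) : List (String × List Int) :=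
  let canons := input_vectors.map canonB
  let keys := (canons.zip input_vectors).map (fun cv => min cv.1 (canonB cv.2.reverse))
  ((PySem.List.dedup keys).foldl
      (fun result k =>
        let idxs := ((PySem.List.enumerate keys 0).filter (fun ik => ik.2 == k)).map (fun ik => ik.1)
        if idxs.length > 1 then
          result.insert (pyStrTuple (PySem.List.pyGetD canons (PySem.List.pyGetD idxs 0 0) [])) idxs
        else result)
      PySem.Dict.empty).items

-- ===== PRECONDITION & SPEC =====
-- Pre_ excludes exactly the inputs containing an empty vector, on which A (and B) raise ValueError.
def Pre_find_identical_snowflakes (input_vectors : List (List Int)) : Prop :=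
  ∀ v ∈ input_vectors, v ≠ []
instance (input_vectors : List (List Int)) : Decidable (Pre_find_identical_snowflakes input_vectors) := by
  unfold Pre_find_identical_snowflakes; infer_instance

def pvWitness_find_identical_snowflakes : List (List Int) := [[1, 2], [2, 1], [3]]

def Spec_find_identical_snowflakes (input_vectors : List (List Int)) (out : List (String × List Int)) : Prop := out = find_identical_snowflakes_alt input_vectors
instance (input_vectors : List (List Int)) (out : List (String × List Int)) : Decidable (Spec_find_identical_snowflakes input_vectors out) := by unfold Spec_find_identical_snowflakes; infer_instance

-- ===== CLAIM (what is proved, stated in full; the proofs are below) =====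
def Claim_equal_find_identical_snowflakes : Prop := ∀ (input_vectors : List (List Int)), Dom_find_identical_snowflakes input_vectors → Pre_find_identical_snowflakes input_vectors → Spec_find_identical_snowflakes input_vectors (find_identical_snowflakes input_vectors)

-- ===== LEMMAS AND PROOFS =====

-- proof-side canonical form: the running lexicographic minimum over ALL rotations
def canonAlt (v : List Int) : List Int :=
  (PySem.List.pyRange 1 (v.length : Int) 1).foldl
    (fun best i =>
      let rot := PySem.List.slice v (some i) none ++ PySem.List.slice v none (some i)
      if rot < best then rot else best) v

-- the list of rotations of v
def rotsL (v : List Int) : List (List Int) := (List.range v.length).map (fun i => v.rotate i)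

lemma slice_rot (v : List Int) (i : Int) (h0 : 0 ≤ i) (h1 : i.toNat ≤ v.length) :
    PySem.List.slice v (some i) none ++ PySem.List.slice v none (some i) = v.rotate i.toNat := by
  rw [PySem.List.slice_from v h0, PySem.List.slice_to v h0, List.rotate_eq_drop_append_take h1]

lemma mem_rotsL_iff {v w : List Int} (hv : v ≠ []) : w ∈ rotsL v ↔ v ~r w := by
  unfold rotsL
  simp only [List.mem_map, List.mem_range]
  constructor
  · rintro ⟨i, _, rfl⟩; exact ⟨i, rfl⟩
  · rintro ⟨n, rfl⟩
    exact ⟨n % v.length, Nat.mod_lt _ (List.length_pos_iff.2 hv), List.rotate_mod v n⟩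

lemma pv_decLT_eq : (fun (a b : List Int) => a.decidableLT b)
    = (inferInstance : LinearOrder (List Int)).toDecidableLT :=
  funext fun _a => funext fun _b => Subsingleton.elim _ _

lemma pv_min?_cast (xs : List Int) (key : Int → List Int) :
    (@PySem.List.min? Int (List Int) List.instLT (fun a b => a.decidableLT b) xs key)
      = @PySem.List.min? Int (List Int) (inferInstance : LinearOrder (List Int)).toLT
          (inferInstance : LinearOrder (List Int)).toDecidableLT xs key := by
  rw [pv_decLT_eq]

lemma foldl_if_lt_eq_foldl_min (f : Int → List Int) (l : List Int) (a : List Int) :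
    l.foldl (fun best i => let rot := f i; if rot < best then rot else best) a
      = (l.map f).foldl min a := by
  induction l generalizing a with
  | nil => rfl
  | cons x t ih =>
    simp only [List.foldl_cons, List.map_cons]
    rw [ih]
    congr 1
    split_ifs with h
    · exact (min_eq_right (le_of_lt h)).symm
    · exact (min_eq_left (not_lt.1 h)).symm

lemma canonAlt_eq_foldl_min (v : List Int) :
    canonAlt v = ((PySem.List.pyRange 1 (v.length : Int) 1).map
      (fun i => PySem.List.slice v (some i) none ++ PySem.List.slice v none (some i))).foldl min v := by
  unfold canonAlt
  exact foldl_if_lt_eq_foldl_min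
    (fun i => PySem.List.slice v (some i) none ++ PySem.List.slice v none (some i))
    (PySem.List.pyRange 1 (v.length : Int) 1) v

lemma canonAlt_isRotated (v : List Int) : v ~r canonAlt v := by
  rw [canonAlt_eq_foldl_min]
  rcases PySem.List.foldl_min_mem ((PySem.List.pyRange 1 (v.length : Int) 1).map
      (fun i => PySem.List.slice v (some i) none ++ PySem.List.slice v none (some i))) v with h | h
  · rw [h]
  · rcases List.mem_map.1 h with ⟨i, hi, heq⟩
    rcases PySem.List.mem_pyRange_one.1 hi with ⟨h1, h2⟩
    rw [← heq, slice_rot v i (by omega) (by omega)]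
    exact ⟨i.toNat, rfl⟩

lemma canonAlt_min {v w : List Int} (h : v ~r w) : canonAlt v ≤ w := by
  by_cases hv : v = []
  · subst hv
    obtain rfl := List.isRotated_nil_iff'.1 h
    decide
  · rcases (mem_rotsL_iff hv).2 h with hmem
    rcases List.mem_map.1 hmem with ⟨j, hj, rfl⟩
    rw [List.mem_range] at hj
    rw [canonAlt_eq_foldl_min]
    rcases Nat.eq_zero_or_pos j with rfl | hj1
    · rw [List.rotate_zero]
      exact (PySem.List.foldl_min_le _ _).1
    · refine (PySem.List.foldl_min_le _ _).2 _ (List.mem_map.2 ⟨(j : Int), ?_, ?_⟩)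
      · exact PySem.List.mem_pyRange_one.2 ⟨by exact_mod_cast hj1, by exact_mod_cast hj⟩
      · rw [slice_rot v (j : Int) (by positivity) (by simpa using hj.le)]
        simp

lemma canonAlt_eq_of_isRotated {v w : List Int} (h : v ~r w) : canonAlt v = canonAlt w :=
  le_antisymm (canonAlt_min (h.trans (canonAlt_isRotated w)))
    (canonAlt_min (h.symm.trans (canonAlt_isRotated v)))

lemma canonAlt_idem (v : List Int) : canonAlt (canonAlt v) = canonAlt v :=
  (canonAlt_eq_of_isRotated (canonAlt_isRotated v)).symm

lemma canonAlt_rev (v : List Int) : canonAlt ((canonAlt v).reverse) = canonAlt v.reverse :=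
  (canonAlt_eq_of_isRotated ((canonAlt_isRotated v).reverse)).symm

lemma hashA_canon {v : List Int} (hv : v ≠ []) : hash_snowflake v = some (canonAlt v) := by
  have hn : 0 < v.length := List.length_pos_iff.2 hv
  have h0mem : (0 : Int) ∈ PySem.List.pyRange 0 (v.length : Int) 1 :=
    PySem.List.mem_pyRange_one.2 ⟨le_refl _, by exact_mod_cast hn⟩
  unfold hash_snowflake
  cases hm : PySem.List.min? (PySem.List.pyRange 0 (v.length : Int) 1)
      (fun i => PySem.List.slice v (some i) none ++ PySem.List.slice v none (some i)) with
  | none =>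
    rw [PySem.List.min?_eq_none_iff] at hm
    rw [hm] at h0mem
    cases h0mem
  | some m =>
    have hmmem := PySem.List.min?_mem hm
    rcases PySem.List.mem_pyRange_one.1 hmmem with ⟨hm0, hm1⟩
    have hrot : PySem.List.slice v (some m) none ++ PySem.List.slice v none (some m)
        = v.rotate m.toNat := slice_rot v m hm0 (by omega)
    refine congrArg some ?_
    refine le_antisymm ?_ ?_
    · rcases List.mem_map.1 ((mem_rotsL_iff hv).2 (canonAlt_isRotated v)) with ⟨j, hj, hcan⟩
      rw [List.mem_range] at hj
      have hjmem : ((j : Int)) ∈ PySem.List.pyRange 0 (v.length : Int) 1 :=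
        PySem.List.mem_pyRange_one.2 ⟨by positivity, by exact_mod_cast hj⟩
      have hm' := hm
      rw [pv_min?_cast] at hm'
      have := PySem.List.min?_isMin hm' _ hjmem
      rw [slice_rot v (j : Int) (by positivity) (by simpa using hj.le), Int.toNat_natCast, hcan] at this
      exact this
    · rw [hrot]
      exact canonAlt_min ⟨m.toNat, rfl⟩

-- ===== canonB: B's candidate-filtered canonicalization computes the same least rotation =====

def candRots (v : List Int) (m : Int) : List (List Int) :=
  ((PySem.List.pyRange 0 (v.length : Int) 1).filter (fun i => PySem.List.pyGetD v i 0 == m)).map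
    (fun i => PySem.List.slice v (some i) none ++ PySem.List.slice v none (some i))

lemma optfold_some (p : Int → Bool) (f : Int → List Int) (l : List Int) (b : List Int) :
    l.foldl (fun best i => if p i then
        (match best with
         | none => some (f i)
         | some b' => if f i < b' then some (f i) else some b')
        else best) (some b)
      = some (((l.filter p).map f).foldl min b) := by
  induction l generalizing b with
  | nil => rfl
  | cons x t ih =>
    by_cases hp : p x
    · simp only [List.foldl_cons, if_pos hp, List.filter_cons_of_pos hp, List.map_cons]
      rw [show (if f x < b then some (f x) else some b) = some (if f x < b then f x else b) from by
        split_ifs <;> rfl]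
      rw [ih]
      congr 2
      split_ifs with h
      · exact (min_eq_right (le_of_lt h)).symm
      · exact (min_eq_left (not_lt.1 h)).symm
    · simp only [List.foldl_cons, if_neg hp, List.filter_cons_of_neg hp]
      exact ih b

lemma optfold_none (p : Int → Bool) (f : Int → List Int) (l : List Int) :
    l.foldl (fun best i => if p i then
        (match best with
         | none => some (f i)
         | some b' => if f i < b' then some (f i) else some b')
        else best) none
      = match (l.filter p).map f with
        | [] => none
        | c :: cs => some (cs.foldl min c) := by
  induction l with
  | nil => rfl
  | cons x t ih =>
    by_cases hp : p x
    · simp only [List.foldl_cons, if_pos hp, List.filter_cons_of_pos hp, List.map_cons]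
      exact optfold_some _ _ _ _
    · simp only [List.foldl_cons, if_neg hp, List.filter_cons_of_neg hp]
      exact ih

lemma cand_elim {v : List Int} {m : Int} {x : List Int} (hx : x ∈ candRots v m) :
    ∃ n, ∃ (hn : n < v.length), x = v.rotate n ∧ v[n] = m := by
  unfold candRots at hx
  rcases List.mem_map.1 hx with ⟨i, hi, rfl⟩
  rcases List.mem_filter.1 hi with ⟨hir, hip⟩
  rcases PySem.List.mem_pyRange_one.1 hir with ⟨h0, h1⟩
  have hn : i.toNat < v.length := by omega
  refine ⟨i.toNat, hn, slice_rot v i h0 (by omega), ?_⟩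
  have := PySem.List.pyGetD_eq_getElem (xs := v) (i := i) (d := 0) h0 (by
    simpa [PySem.List.len_eq] using h1)
  rw [this] at hip
  exact (beq_iff_eq.1 hip).symm ▸ rfl

lemma cand_mem {v : List Int} {m : Int} {n : Nat} (hn : n < v.length) (hm : v[n] = m) :
    v.rotate n ∈ candRots v m := by
  unfold candRots
  refine List.mem_map.2 ⟨(n : Int), List.mem_filter.2 ⟨?_, ?_⟩, ?_⟩
  · exact PySem.List.mem_pyRange_one.2 ⟨by positivity, by exact_mod_cast hn⟩
  · simp only [PySem.List.pyGetD_natCast]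
    rw [List.getD_eq_getElem v 0 hn, hm]
    exact beq_self_eq_true m
  · rw [slice_rot v (n : Int) (by positivity) (by simpa using hn.le)]
    simp

lemma canonB_least {v : List Int} (hv : v ≠ []) :
    (v ~r canonB v) ∧ ∀ w, v ~r w → canonB v ≤ w := by
  have hlen : 0 < v.length := List.length_pos_iff.2 hv
  obtain ⟨m, hmin⟩ : ∃ m, PySem.List.min? v (fun x => x) = some m := by
    cases hm : PySem.List.min? v (fun x => x) with
    | none => exact absurd ((PySem.List.min?_eq_none_iff _ _).1 hm) hv
    | some m => exact ⟨m, rfl⟩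
  have hmem : m ∈ v := PySem.List.min?_mem hmin
  have hle : ∀ y ∈ v, m ≤ y := fun y hy => PySem.List.min?_isMin hmin y hy
  obtain ⟨j, hj, hvj⟩ := List.getElem_of_mem hmem
  have hcand_ne : candRots v m ≠ [] :=
    List.ne_nil_of_mem (cand_mem hj hvj)
  obtain ⟨c, cs, hc⟩ := List.exists_cons_of_ne_nil hcand_ne
  have hcanon : canonB v = cs.foldl min c := by
    unfold canonB
    rw [hmin]
    have hoo := optfold_none (fun i => PySem.List.pyGetD v i 0 == m)
      (fun i => PySem.List.slice v (some i) none ++ PySem.List.slice v none (some i))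
      (PySem.List.pyRange 0 (v.length : Int) 1)
    rw [show ((PySem.List.pyRange 0 (v.length : Int) 1).filter
          (fun i => PySem.List.pyGetD v i 0 == m)).map
          (fun i => PySem.List.slice v (some i) none ++ PySem.List.slice v none (some i))
        = candRots v m from rfl, hc] at hoo
    show (List.foldl (fun best i => if PySem.List.pyGetD v i 0 == m then
        (match best with
         | none => some (PySem.List.slice v (some i) none ++ PySem.List.slice v none (some i))
         | some b' => if PySem.List.slice v (some i) none ++ PySem.List.slice v none (some i) < b'
             then some (PySem.List.slice v (some i) none ++ PySem.List.slice v none (some i))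
             else some b')
        else best) none (PySem.List.pyRange 0 (v.length : Int) 1)).getD [] = cs.foldl min c
    rw [hoo]
    rfl
  have hmemc : canonB v ∈ candRots v m := by
    rw [hcanon, hc]
    rcases PySem.List.foldl_min_mem cs c with h | h
    · rw [h]; exact List.mem_cons_self
    · exact List.mem_cons_of_mem _ h
  have hleall : ∀ x ∈ candRots v m, canonB v ≤ x := by
    intro x hx
    rw [hc] at hx
    rcases List.mem_cons.1 hx with h | hx'
    · rw [h, hcanon]; exact (PySem.List.foldl_min_le cs c).1
    · rw [hcanon]; exact (PySem.List.foldl_min_le cs c).2 x hx'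
  obtain ⟨n₁, hn₁, hrot₁, hm₁⟩ := cand_elim hmemc
  constructor
  · exact hrot₁ ▸ ⟨n₁, rfl⟩
  · intro w hw
    obtain ⟨n₀, rfl⟩ := hw
    rw [← List.rotate_mod]
    set n := n₀ % v.length with hn
    have hnlt : n < v.length := Nat.mod_lt _ hlen
    by_cases hm' : v[n] = m
    · exact hleall _ (cand_mem hnlt hm')
    · have hlt : m < v[n] := lt_of_le_of_ne (hle _ (List.getElem_mem hnlt)) (Ne.symm hm')
      have hne1 : v.rotate n₁ ≠ [] := by
        intro h; have := List.length_rotate v n₁; rw [h] at this; simp at this; omega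
      have hne2 : v.rotate n ≠ [] := by
        intro h; have := List.length_rotate v n; rw [h] at this; simp at this; omega
      obtain ⟨a, as, ha⟩ := List.exists_cons_of_ne_nil hne1
      obtain ⟨b, bs, hb⟩ := List.exists_cons_of_ne_nil hne2
      have hha : a = v[n₁] := by
        have h0 : (v.rotate n₁)[0]? = some a := by rw [ha]; rfl
        rw [List.getElem?_eq_getElem (by rw [List.length_rotate]; omega)] at h0
        rw [List.getElem_rotate v n₁ 0 (by rw [List.length_rotate]; omega)] at h0
        have h2 := Option.some.inj h0
        simp only [Nat.zero_add, Nat.mod_eq_of_lt hn₁] at h2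
        exact h2.symm
      have hhb : b = v[n] := by
        have h0 : (v.rotate n)[0]? = some b := by rw [hb]; rfl
        rw [List.getElem?_eq_getElem (by rw [List.length_rotate]; omega)] at h0
        rw [List.getElem_rotate v n 0 (by rw [List.length_rotate]; omega)] at h0
        have h2 := Option.some.inj h0
        simp only [Nat.zero_add, Nat.mod_eq_of_lt hnlt] at h2
        exact h2.symm
      rw [hrot₁, ha, hb]
      refine le_of_lt ?_
      rw [List.cons_lt_cons_iff]
      exact Or.inl (by rw [hha, hhb, hm₁]; exact hlt)

lemma canonB_eq_canonAlt {v : List Int} (hv : v ≠ []) : canonB v = canonAlt v :=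
  le_antisymm ((canonB_least hv).2 _ (canonAlt_isRotated v))
    (canonAlt_min (canonB_least hv).1)

-- ===== ghost dict: grouping by the symmetric canonical key =====

def kfn (p : Int × List Int) : List Int := min (canonAlt p.2) (canonAlt p.2.reverse)
def cfn (p : Int × List Int) : List Int := canonAlt p.2

def stepG (g : PySem.Dict (List Int) (List Int × List Int)) (p : Int × List Int) :
    PySem.Dict (List Int) (List Int × List Int) :=
  match g.get? (kfn p) with
  | some pr => g.insert (kfn p) (pr.1, pr.2 ++ [p.1])
  | none => g.insert (kfn p) (cfn p, [p.1])

def symmK (k : List Int) : List Int := min k (canonAlt k.reverse)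
def emap (kv : List Int × List Int) : List Int × (List Int × List Int) := (symmK kv.1, kv)

def InvAB (dA : PySem.Dict (List Int) (List Int)) (dB : PySem.Dict (List Int) (List Int × List Int)) : Prop :=
  dB.items = dA.items.map emap ∧ dA.keys.Nodup ∧ (dA.keys.map symmK).Nodup ∧
    ∀ k ∈ dA.keys, canonAlt k = k

lemma symmK_mem_pair {k c r : List Int} (hk : canonAlt k = k)
    (hc : canonAlt (r.reverse) = c) (hr : canonAlt (c.reverse) = r)
    (h : symmK k = min c r) : k = c ∨ k = r := by
  unfold symmK at h
  have hkk : canonAlt (k.reverse.reverse) = canonAlt ((canonAlt k.reverse).reverse) :=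
    (canonAlt_rev k.reverse).symm
  rw [List.reverse_reverse, hk] at hkk
  rcases min_choice k (canonAlt k.reverse) with h1 | h1 <;> rw [h1] at h
  · rcases min_choice c r with h2 | h2
    · exact Or.inl (h.trans h2)
    · exact Or.inr (h.trans h2)
  · rcases min_choice c r with h2 | h2
    · refine Or.inr ?_
      rw [hkk, h.trans h2, hr]
    · refine Or.inl ?_
      rw [hkk, h.trans h2, hc]

lemma step_inv {dA dB} (hInv : InvAB dA dB) (p : Int × List Int) (hp : p.2 ≠ []) :
    InvAB (stepA dA p) (stepG dB p) := by
  obtain ⟨hitems, hnodup, hsnodup, hcanon⟩ := hInv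
  have hrevne : p.2.reverse ≠ [] := by simpa using hp
  set c := canonAlt p.2 with hc
  set r := canonAlt p.2.reverse with hr
  have hcr : canonAlt (c.reverse) = r := canonAlt_rev p.2
  have hrc : canonAlt (r.reverse) = c := by
    have := canonAlt_rev p.2.reverse
    rwa [List.reverse_reverse] at this
  have hccan : canonAlt c = c := canonAlt_idem p.2
  have hS2c : symmK c = min c r := by unfold symmK; rw [hcr]
  have hS2r : symmK r = min c r := by unfold symmK; rw [hrc, min_comm]
  have hBkeys : dB.keys = dA.keys.map symmK := by
    simp only [PySem.Dict.keys, hitems, List.map_map]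
    rfl
  have hBnodup : dB.keys.Nodup := by rw [hBkeys]; exact hsnodup
  have hinj := List.inj_on_of_nodup_map hsnodup
  have hkey_pair : ∀ k ∈ dA.keys, symmK k = min c r → k = c ∨ k = r := fun k hkmem hkeq =>
    symmK_mem_pair (hcanon k hkmem) hrc hcr hkeq
  have hA : stepA dA p = (if dA.contains c then dA.insert c (dA.getD c [] ++ [p.1])
      else if dA.contains r then dA.insert r (dA.getD r [] ++ [p.1]) else dA.insert c [p.1]) := by
    unfold stepA
    rw [hashA_canon hp, hashA_canon hrevne]
  have hB : stepG dB p = (match dB.get? (min c r) with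
      | some pr => dB.insert (min c r) (pr.1, pr.2 ++ [p.1])
      | none => dB.insert (min c r) (c, [p.1])) := rfl
  have hupdate : ∀ k0, (k0 = c ∨ k0 = r) → ∀ (hk0 : dA.contains k0 = true),
      (∀ k ∈ dA.keys, k ≠ k0 → symmK k ≠ min c r) →
      InvAB (dA.insert k0 (dA.getD k0 [] ++ [p.1]))
            (dB.insert (min c r) (k0, dA.getD k0 [] ++ [p.1])) := by
    intro k0 hk0cr hk0 hothers
    have hk0mem : k0 ∈ dA.keys := (PySem.Dict.contains_iff_mem_keys dA k0).1 hk0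
    have hs0 : symmK k0 = min c r := by rcases hk0cr with rfl | rfl; exact hS2c; exact hS2r
    have hBcont : dB.contains (min c r) = true := by
      refine (PySem.Dict.contains_iff_mem_keys dB (min c r)).2 ?_
      rw [hBkeys]
      exact List.mem_map.2 ⟨k0, hk0mem, hs0⟩
    refine ⟨?_, ?_, ?_, ?_⟩
    · rw [PySem.Dict.items_insert_of_contains dA _ hk0,
          PySem.Dict.items_insert_of_contains dB _ hBcont, hitems, List.map_map, List.map_map]
      refine List.map_congr_left ?_
      intro kv hkv
      have hkmem : kv.1 ∈ dA.keys := PySem.Dict.mem_keys_of_mem_items dA hkv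
      by_cases hkc : kv.1 = k0
      · simp only [Function.comp, hkc, beq_self_eq_true, if_true, emap, hs0, beq_self_eq_true]
      · have hne : symmK kv.1 ≠ min c r := hothers kv.1 hkmem hkc
        simp only [Function.comp, emap, beq_iff_eq, hkc, hne, if_false]
    · rw [PySem.Dict.keys_insert_of_contains dA _ hk0]
      exact hnodup
    · rw [PySem.Dict.keys_insert_of_contains dA _ hk0]
      exact hsnodup
    · rw [PySem.Dict.keys_insert_of_contains dA _ hk0]
      exact hcanon
  rw [hA, hB]
  by_cases hca : dA.contains c = true
  · have hcmem : c ∈ dA.keys := (PySem.Dict.contains_iff_mem_keys dA c).1 hca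
    obtain ⟨w, hw⟩ : ∃ w, dA.get? c = some w := by
      have := PySem.Dict.contains_eq_isSome_get? dA c
      rw [hca] at this
      exact Option.isSome_iff_exists.1 this.symm
    have hwitem : (c, w) ∈ dA.items := (PySem.Dict.get?_eq_some_iff_mem_items dA c w hnodup).1 hw
    have hBget : dB.get? (min c r) = some (c, w) := by
      refine (PySem.Dict.get?_eq_some_iff_mem_items dB (min c r) (c, w) hBnodup).2 ?_
      rw [hitems]
      exact List.mem_map.2 ⟨(c, w), hwitem, by simp [emap, hS2c]⟩
    have hgd : dA.getD c [] = w := PySem.Dict.getD_of_get?_eq_some dA [] hw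
    rw [if_pos hca, hBget]
    simp only []
    rw [← hgd]
    refine hupdate c (Or.inl rfl) hca ?_
    intro k hkmem hkne hkeq
    rcases hkey_pair k hkmem hkeq with rfl | rfl
    · exact hkne rfl
    · exact hkne (hinj hkmem hcmem (hkeq.trans hS2c.symm))
  · have hca' : dA.contains c = false := by simpa using hca
    by_cases hcb : dA.contains r = true
    · have hrmem : r ∈ dA.keys := (PySem.Dict.contains_iff_mem_keys dA r).1 hcb
      obtain ⟨w, hw⟩ : ∃ w, dA.get? r = some w := by
        have := PySem.Dict.contains_eq_isSome_get? dA r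
        rw [hcb] at this
        exact Option.isSome_iff_exists.1 this.symm
      have hwitem : (r, w) ∈ dA.items := (PySem.Dict.get?_eq_some_iff_mem_items dA r w hnodup).1 hw
      have hBget : dB.get? (min c r) = some (r, w) := by
        refine (PySem.Dict.get?_eq_some_iff_mem_items dB (min c r) (r, w) hBnodup).2 ?_
        rw [hitems]
        exact List.mem_map.2 ⟨(r, w), hwitem, by simp [emap, hS2r]⟩
      have hgd : dA.getD r [] = w := PySem.Dict.getD_of_get?_eq_some dA [] hw
      rw [if_neg (by simp [hca']), if_pos hcb, hBget]
      simp only []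
      rw [← hgd]
      refine hupdate r (Or.inr rfl) hcb ?_
      intro k hkmem hkne hkeq
      rcases hkey_pair k hkmem hkeq with rfl | rfl
      · exact absurd ((PySem.Dict.contains_iff_mem_keys dA _).2 hkmem) (by simp [hca'])
      · exact hkne rfl
    · have hcb' : dA.contains r = false := by simpa using hcb
      have hnotmem : min c r ∉ dB.keys := by
        rw [hBkeys]
        intro hmem
        rcases List.mem_map.1 hmem with ⟨k, hkmem, hkeq⟩
        rcases hkey_pair k hkmem hkeq with rfl | rfl
        · exact absurd ((PySem.Dict.contains_iff_mem_keys dA _).2 hkmem) (by simp [hca'])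
        · exact absurd ((PySem.Dict.contains_iff_mem_keys dA _).2 hkmem) (by simp [hcb'])
      have hBget : dB.get? (min c r) = none :=
        (PySem.Dict.get?_eq_none_iff_not_mem_keys dB (min c r)).2 hnotmem
      have hBcont : dB.contains (min c r) = false := by
        rw [PySem.Dict.contains_eq_isSome_get?, hBget]
        rfl
      rw [if_neg (by simp [hca']), if_neg (by simp [hcb']), hBget]
      simp only []
      refine ⟨?_, ?_, ?_, ?_⟩
      · rw [PySem.Dict.items_insert_of_not_contains dA _ hca',
            PySem.Dict.items_insert_of_not_contains dB _ hBcont, hitems, List.map_append]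
        simp [emap, hS2c]
      · rw [PySem.Dict.keys_insert_of_not_contains dA _ hca']
        refine List.nodup_append.2 ⟨hnodup, List.nodup_singleton _, ?_⟩
        intro k hkmem q hq
        rw [List.mem_singleton] at hq
        subst hq
        intro hkq
        subst hkq
        exact absurd ((PySem.Dict.contains_iff_mem_keys dA _).2 hkmem) (by simp [hca'])
      · rw [PySem.Dict.keys_insert_of_not_contains dA _ hca', List.map_append]
        refine List.nodup_append.2 ⟨hsnodup, List.nodup_singleton _, ?_⟩
        intro q hqmem q2 hq2
        rw [List.map_cons, List.map_nil, List.mem_singleton] at hq2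
        subst hq2
        intro heq
        rw [hBkeys] at hnotmem
        rw [heq, hS2c] at hqmem
        exact hnotmem hqmem
      · rw [PySem.Dict.keys_insert_of_not_contains dA _ hca']
        intro k hkmem
        rcases List.mem_append.1 hkmem with hkl | hkr
        · exact hcanon k hkl
        · rw [List.mem_singleton.1 hkr]
          exact hccan

lemma loop_inv (l : List (Int × List Int)) (hl : ∀ p ∈ l, p.2 ≠ []) :
    ∀ {dA dB}, InvAB dA dB → InvAB (l.foldl stepA dA) (l.foldl stepG dB) := by
  intro dA dB h
  induction l generalizing dA dB with
  | nil => exact h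
  | cons p t ih =>
    simp only [List.foldl_cons]
    exact ih (fun q hq => hl q (List.mem_cons_of_mem _ hq)) (step_inv h p (hl p (List.mem_cons_self)))

-- ===== ordered characterization of the ghost dict =====

def Fidx (l : List (Int × List Int)) (k : List Int) : List Int :=
  (l.filter (fun p => kfn p == k)).map (fun p => p.1)

def Fspec (l : List (Int × List Int)) (k : List Int) : List Int × List Int :=
  match l.filter (fun p => kfn p == k) with
  | [] => ([], [])
  | q :: qs => (cfn q, (q :: qs).map (fun p => p.1))

lemma Fspec_snd (l : List (Int × List Int)) (k : List Int) : (Fspec l k).2 = Fidx l k := by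
  unfold Fspec Fidx
  cases hf : l.filter (fun p => kfn p == k) <;> simp

lemma stepG_none {g : PySem.Dict (List Int) (List Int × List Int)} {p : Int × List Int}
    (h : g.get? (kfn p) = none) : stepG g p = g.insert (kfn p) (cfn p, [p.1]) := by
  unfold stepG; rw [h]

lemma stepG_some {g : PySem.Dict (List Int) (List Int × List Int)} {p : Int × List Int}
    {pr : List Int × List Int} (h : g.get? (kfn p) = some pr) :
    stepG g p = g.insert (kfn p) (pr.1, pr.2 ++ [p.1]) := by
  unfold stepG; rw [h]

lemma ghost_get? (l : List (Int × List Int)) (k : List Int) :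
    (l.foldl stepG PySem.Dict.empty).get? k =
      match l.filter (fun p => kfn p == k) with
      | [] => none
      | q :: qs => some (cfn q, (q :: qs).map (fun p => p.1)) := by
  induction l using List.reverseRecOn with
  | nil => simp [PySem.Dict.get?_empty]
  | append_singleton t p ih =>
    rw [List.foldl_append, List.foldl_cons, List.foldl_nil, List.filter_append]
    by_cases hk : kfn p = k
    · subst hk
      cases hget : (t.foldl stepG PySem.Dict.empty).get? (kfn p) with
      | none =>
        have hfil : t.filter (fun q => kfn q == kfn p) = [] := by
          have h2 := ih
          rw [hget] at h2
          cases hf : t.filter (fun q => kfn q == kfn p) with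
          | nil => rfl
          | cons q qs => rw [hf] at h2; simp at h2
        rw [stepG_none hget, PySem.Dict.get?_insert_self, hfil]
        simp
      | some pr =>
        have h2 := ih
        rw [hget] at h2
        cases hf : t.filter (fun q => kfn q == kfn p) with
        | nil => rw [hf] at h2; simp at h2
        | cons q qs =>
          rw [hf] at h2
          have hpr : pr = (cfn q, (q :: qs).map (fun p => p.1)) := by
            simpa using h2
          rw [stepG_some hget, PySem.Dict.get?_insert_self, hpr]
          simp
    · have hfp : List.filter (fun q => kfn q == k) [p] = [] := by
        simp [hk]
      rw [hfp, List.append_nil]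
      cases hget : (t.foldl stepG PySem.Dict.empty).get? (kfn p) with
      | none =>
        rw [stepG_none hget, PySem.Dict.get?_insert_of_ne _ _ (fun h => hk h.symm)]
        exact ih
      | some pr =>
        rw [stepG_some hget, PySem.Dict.get?_insert_of_ne _ _ (fun h => hk h.symm)]
        exact ih

lemma dedup_append_singleton (xs : List (List Int)) (x : List Int) :
    PySem.List.dedup (xs ++ [x]) =
      if x ∈ xs then PySem.List.dedup xs else PySem.List.dedup xs ++ [x] := by
  have hc : (PySem.Set.ofList xs).contains x = true ↔ x ∈ xs := by
    simp [PySem.Set.contains, PySem.Set.mem_ofList]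
  rw [PySem.List.dedup_eq_ofList, PySem.List.dedup_eq_ofList, PySem.Set.ofList_eq_foldl,
    PySem.Set.ofList_eq_foldl, List.foldl_append, List.foldl_cons, List.foldl_nil,
    ← PySem.Set.ofList_eq_foldl]
  show (if (PySem.Set.ofList xs).contains x then PySem.Set.ofList xs
      else PySem.Set.ofList xs ++ [x]) = _
  by_cases hm : x ∈ xs
  · rw [if_pos (hc.2 hm), if_pos hm, PySem.Set.ofList_eq_foldl]
  · rw [if_neg (fun h => hm (hc.1 h)), if_neg hm, PySem.Set.ofList_eq_foldl]

lemma ghost_keys (l : List (Int × List Int)) :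
    (l.foldl stepG PySem.Dict.empty).keys = PySem.List.dedup (l.map kfn) := by
  induction l using List.reverseRecOn with
  | nil => simp [PySem.Dict.keys_empty, PySem.List.dedup_eq_ofList, PySem.Set.ofList_eq_foldl]
  | append_singleton t p ih =>
    rw [List.foldl_append, List.foldl_cons, List.foldl_nil, List.map_append, List.map_cons,
      List.map_nil, dedup_append_singleton]
    have hmem_iff : kfn p ∈ t.map kfn ↔ t.filter (fun q => kfn q == kfn p) ≠ [] := by
      constructor
      · intro h hnil
        rcases List.mem_map.1 h with ⟨q, hq, heq⟩
        rw [List.filter_eq_nil_iff] at hnil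
        exact hnil q hq (by simp [heq])
      · intro h
        by_contra hnm
        apply h
        rw [List.filter_eq_nil_iff]
        intro q hq hbq
        exact hnm (List.mem_map.2 ⟨q, hq, beq_iff_eq.1 hbq⟩)
    cases hget : (t.foldl stepG PySem.Dict.empty).get? (kfn p) with
    | none =>
      have hfil : t.filter (fun q => kfn q == kfn p) = [] := by
        have h2 := ghost_get? t (kfn p)
        rw [hget] at h2
        cases hf : t.filter (fun q => kfn q == kfn p) with
        | nil => rfl
        | cons q qs => rw [hf] at h2; simp at h2
      have hnm : kfn p ∉ t.map kfn := fun h => (hmem_iff.1 h) hfil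
      have hcont : (t.foldl stepG PySem.Dict.empty).contains (kfn p) = false := by
        rw [PySem.Dict.contains_eq_isSome_get?, hget]; rfl
      rw [stepG_none hget, PySem.Dict.keys_insert_of_not_contains _ _ hcont, ih, if_neg hnm]
    | some pr =>
      have hfil : t.filter (fun q => kfn q == kfn p) ≠ [] := by
        have h2 := ghost_get? t (kfn p)
        rw [hget] at h2
        intro hf
        rw [hf] at h2
        simp at h2
      have hcont : (t.foldl stepG PySem.Dict.empty).contains (kfn p) = true := by
        rw [PySem.Dict.contains_eq_isSome_get?, hget]; rfl
      rw [stepG_some hget, PySem.Dict.keys_insert_of_contains _ _ hcont, ih,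
        if_pos (hmem_iff.2 hfil)]

lemma ghost_getD (l : List (Int × List Int)) (k : List Int) :
    (l.foldl stepG PySem.Dict.empty).getD k ([], []) = Fspec l k := by
  rw [PySem.Dict.getD_eq_get?_getD, ghost_get?]
  unfold Fspec
  cases hf : l.filter (fun p => kfn p == k) <;> simp

-- enumerate over a mapped list / enumerate of an enumerate
lemma enumerate_map {α β : Type} (g : α → β) (xs : List α) (s : Int) :
    PySem.List.enumerate (xs.map g) s = (PySem.List.enumerate xs s).map (fun p => (p.1, g p.2)) := by
  rw [PySem.List.enumerate_eq_zipIdx_map, PySem.List.enumerate_eq_zipIdx_map, List.zipIdx_map,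
    List.map_map, List.map_map]
  rfl

lemma enum_enum {α : Type} (xs : List α) (s : Int) :
    PySem.List.enumerate (PySem.List.enumerate xs s) s
      = (PySem.List.enumerate xs s).map (fun p => (p.1, p)) := by
  induction xs generalizing s with
  | nil => simp [PySem.List.enumerate_nil]
  | cons x t ih =>
    rw [PySem.List.enumerate_cons, PySem.List.enumerate_cons, ih (s + 1), List.map_cons]

lemma A_items_char (iv : List (List Int)) (hpre : ∀ v ∈ iv, v ≠ []) :
    ((PySem.List.enumerate iv 0).foldl stepA PySem.Dict.empty).items
      = (PySem.List.dedup ((PySem.List.enumerate iv 0).map kfn)).map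
          (fun k => Fspec (PySem.List.enumerate iv 0) k) := by
  set l := PySem.List.enumerate iv 0 with hl
  have hlne : ∀ p ∈ l, p.2 ≠ [] := by
    intro p hp
    rcases (PySem.List.mem_enumerate_iff _ _ _).1 hp with ⟨k, hk, rfl⟩
    exact hpre _ (List.getElem_mem hk)
  have hInv0 : InvAB PySem.Dict.empty PySem.Dict.empty := by
    refine ⟨?_, ?_, ?_, ?_⟩ <;> simp [PySem.Dict.keys, PySem.Dict.empty]
  obtain ⟨hitems, -, -, -⟩ := loop_inv l hlne hInv0
  have hvals : (l.foldl stepG PySem.Dict.empty).values = (l.foldl stepA PySem.Dict.empty).items := by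
    simp only [PySem.Dict.values, hitems, List.map_map]
    have hsnd : (Prod.snd ∘ emap) = (id : List Int × List Int → List Int × List Int) := by
      funext kv; rfl
    rw [hsnd, List.map_id]
  have hnd : (l.foldl stepG PySem.Dict.empty).keys.Nodup := by
    rw [ghost_keys]; exact PySem.List.nodup_dedup _
  rw [← hvals, PySem.Dict.values_eq_map_keys _ hnd ([], []), ghost_keys]
  exact List.map_congr_left (fun k _ => ghost_getD l k)

lemma keys_eq (iv : List (List Int)) (hpre : ∀ v ∈ iv, v ≠ []) :
    ((iv.map canonB).zip iv).map (fun cv => min cv.1 (canonB cv.2.reverse))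
      = (PySem.List.enumerate iv 0).map kfn := by
  have h1 : (iv.map canonB).zip iv = iv.map (fun v => (canonB v, v)) := by
    conv_lhs => rw [show (iv.map canonB).zip iv = (iv.map canonB).zip (iv.map id) by
      rw [List.map_id]]
    exact List.zip_map'
  rw [h1, List.map_map]
  have h2 : iv.map ((fun cv : List Int × List Int => min cv.1 (canonB cv.2.reverse))
        ∘ (fun v => (canonB v, v)))
      = iv.map (fun v => min (canonAlt v) (canonAlt v.reverse)) := by
    refine List.map_congr_left (fun v hv => ?_)
    have hv' : v ≠ [] := hpre v hv
    have hvr : v.reverse ≠ [] := by simpa using hv'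
    simp only [Function.comp]
    rw [canonB_eq_canonAlt hv', canonB_eq_canonAlt hvr]
  rw [h2, PySem.List.enumerate_eq_zipIdx_map, List.map_map]
  have h3 : (kfn ∘ fun p : List Int × Nat => ((0 : Int) + (p.2 : Int), p.1))
      = ((fun v => min (canonAlt v) (canonAlt v.reverse)) ∘ Prod.fst) := rfl
  rw [h3, ← List.map_map, List.zipIdx_map_fst 0 iv]

lemma enumKeys (iv : List (List Int)) :
    PySem.List.enumerate ((PySem.List.enumerate iv 0).map kfn) 0
      = (PySem.List.enumerate iv 0).map (fun p => (p.1, kfn p)) := by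
  rw [enumerate_map, enum_enum, List.map_map]
  rfl

lemma idxs_eq (l : List (Int × List Int)) (k : List Int) :
    ((l.map (fun p => (p.1, kfn p))).filter (fun ik => ik.2 == k)).map (fun ik => ik.1)
      = Fidx l k := by
  rw [List.filter_map, List.map_map]
  rfl

lemma rep_eq (iv : List (List Int)) (hpre : ∀ v ∈ iv, v ≠ []) (k : List Int)
    (hk : (PySem.List.enumerate iv 0).filter (fun p => kfn p == k) ≠ []) :
    PySem.List.pyGetD (iv.map canonB)
        (PySem.List.pyGetD (Fidx (PySem.List.enumerate iv 0) k) 0 0) []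
      = (Fspec (PySem.List.enumerate iv 0) k).1 := by
  obtain ⟨q, qs, hf⟩ := List.exists_cons_of_ne_nil hk
  have hq : q ∈ PySem.List.enumerate iv 0 :=
    List.mem_of_mem_filter (hf ▸ List.mem_cons_self)
  rcases (PySem.List.mem_enumerate_iff _ _ _).1 hq with ⟨j, hj, hqe⟩
  have hFidx : Fidx (PySem.List.enumerate iv 0) k = q.1 :: qs.map (fun p => p.1) := by
    unfold Fidx
    rw [hf, List.map_cons]
  have hFspec : (Fspec (PySem.List.enumerate iv 0) k).1 = cfn q := by
    unfold Fspec
    rw [hf]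
  rw [hFidx, hFspec, PySem.List.pyGetD_zero_cons, hqe]
  simp only [zero_add]
  rw [PySem.List.pyGetD_natCast]
  rw [List.getD_eq_getElem (iv.map canonB) [] (by simpa using hj), List.getElem_map]
  unfold cfn
  exact canonB_eq_canonAlt (hpre _ (List.getElem_mem hj))

-- ===== VERDICT (by name: the statement is the Claim_ definition above) =====
theorem find_identical_snowflakes_spec : Claim_equal_find_identical_snowflakes := by
  intro iv _ hpre
  unfold Spec_find_identical_snowflakes
  simp only [find_identical_snowflakes, find_identical_snowflakes_alt]
  rw [keys_eq iv hpre, enumKeys iv, A_items_char iv hpre]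
  rw [List.filter_map, List.foldl_map]
  simp only [idxs_eq]
  rw [PySem.List.foldl_ite_eq_foldl_filter]
  simp only [Function.comp_def, Fspec_snd]
  congr 1
  apply PySem.List.foldl_congr_mem
  intro acc k hkmem
  have hk1 : (Fidx (PySem.List.enumerate iv 0) k).length > 1 := by
    have := List.of_mem_filter hkmem
    simpa using this
  have hfil : (PySem.List.enumerate iv 0).filter (fun p => kfn p == k) ≠ [] := by
    intro hf
    unfold Fidx at hk1
    rw [hf] at hk1
    simp at hk1
  rw [rep_eq iv hpre k hfil]
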